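-- pv_equiv track=rewrite | github.com/ZZy979/LeetCode | Algorithms/2901/getWordsInLongestSubsequence.py | getWordsInLongestSubsequence
-- ===== SOURCE A (Python) =====
-- from typing import List
--
-- def getWordsInLongestSubsequence(words: List[str], groups: List[int]) -> List[str]:
--     n = len(words)
--     dp = [0] * n  # dp[i]表示以words[i]结尾的满足条件的最长子序列的长度
--     dp[0] = 1
--     last = [-1] * n
--     for i in range(1, n):
--         mx, idx = 0, -1
--         for j in range(i):
--             if groups[i] != groups[j] and len(words[i]) == len(words[j]) \
--                 and hamming_distance(words[i], words[j]) == 1 and dp[j] > mx: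
--                 mx, idx = dp[j], j
--         dp[i], last[i] = mx + 1, idx
--
--     m = 0
--     for i in range(1, n):
--         if dp[i] > dp[m]:
--             m = i
--
--     ans = []
--     while m >= 0:
--         ans.append(words[m])
--         m = last[m]
--     ans.reverse()
--     return ans
--
-- def hamming_distance(s1, s2):
--     return sum(c1 != c2 for c1, c2 in zip(s1, s2))
-- ===== SOURCE B (Python) =====
-- def getWordsInLongestSubsequence(words, groups):
--     # Wildcard-pattern bucketing: indices are grouped by (position, prefix, suffix)
--     # patterns, so candidate predecessors (same length, Hamming distance 1) are read
--     # straight out of the buckets instead of being rediscovered by an O(n) scan per i.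
--     n = len(words)
--     buckets = {}  # (p, w[:p], w[p+1:]) -> indices of words matching that pattern
--     dp = []       # dp[i] = length of the best valid subsequence ending at i
--     last = []     # predecessor of i in that subsequence (-1 if none)
--     for i in range(n):
--         w = words[i]
--         best_len, best_j = 0, -1
--         for p in range(len(w)):
--             pat = (p, w[:p], w[p + 1:])
--             for j in buckets.get(pat, []):
--                 if words[j] != w and groups[j] != groups[i] \
--                    and (dp[j] > best_len or (dp[j] == best_len and j < best_j)):
--                     best_len, best_j = dp[j], j
--             buckets[pat] = buckets.get(pat, []) + [i]
--         dp.append(best_len + 1)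
--         last.append(best_j)
--     m = max(range(n), key=lambda i: dp[i])
--     ans = []
--     while m >= 0:
--         ans.append(words[m])
--         m = last[m]
--     return ans[::-1]
-- ===== Notes on version B (the rewrite author's own statement) =====
-- stated objective: faster
-- what changed: B replaces A's O(n^2) all-pairs inner scan by a dict of wildcard-pattern buckets (position, prefix, suffix): candidate predecessors at Hamming distance 1 are read straight out of the buckets, and ties are broken towards the smallest index to keep A's exact choice.
import Mathlib
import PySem

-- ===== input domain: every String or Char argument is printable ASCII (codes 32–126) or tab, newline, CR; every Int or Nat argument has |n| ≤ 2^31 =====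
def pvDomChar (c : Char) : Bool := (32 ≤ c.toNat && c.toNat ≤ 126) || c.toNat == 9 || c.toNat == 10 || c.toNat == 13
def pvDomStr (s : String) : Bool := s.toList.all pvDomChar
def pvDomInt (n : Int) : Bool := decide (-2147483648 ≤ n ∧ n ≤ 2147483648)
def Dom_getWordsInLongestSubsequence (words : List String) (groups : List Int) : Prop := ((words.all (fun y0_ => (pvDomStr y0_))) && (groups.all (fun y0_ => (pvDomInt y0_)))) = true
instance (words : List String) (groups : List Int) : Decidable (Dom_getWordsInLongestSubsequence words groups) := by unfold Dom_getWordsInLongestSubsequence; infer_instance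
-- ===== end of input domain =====

-- B replaces A's O(n^2) all-pairs predecessor scan by wildcard-pattern buckets:
-- candidate predecessors (same length, Hamming distance 1) are read out of a dict
-- keyed by (position, prefix, suffix) patterns; objective: faster.

-- ===== PORT A =====
-- hamming_distance(s1, s2) = sum(c1 != c2 for c1, c2 in zip(s1, s2))
def pvHamming (s1 s2 : String) : Int :=
  (s1.toList.zip s2.toList).foldl (fun acc p => acc + (if p.1 ≠ p.2 then 1 else 0)) 0

-- body of 'for i in range(1, n)': dp and last are preallocated in Python and written
-- left to right at position i, never read above i, so appending is the same computation
def pvStepA (words : List String) (groups : List Int) (st : List Int × List Int) (i : Int) :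
    List Int × List Int :=
  let dp := st.1
  let last := st.2
  let r := (PySem.List.pyRange 0 i 1).foldl
    (fun (p : Int × Int) j =>
      if PySem.List.pyGetD groups i 0 ≠ PySem.List.pyGetD groups j 0
          ∧ PySem.Str.len (PySem.List.pyGetD words i "") = PySem.Str.len (PySem.List.pyGetD words j "")
          ∧ pvHamming (PySem.List.pyGetD words i "") (PySem.List.pyGetD words j "") = 1
          ∧ PySem.List.pyGetD dp j 0 > p.1
      then (PySem.List.pyGetD dp j 0, j) else p) (0, -1)
  (dp ++ [r.1 + 1], last ++ [r.2])

-- while m >= 0: ans.append(words[m]); m = last[m]   — fuel only makes the loop total;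
-- on Pre_ inputs last[m] < m, so fuel (length words + 1) is never exhausted
def pvWalk (words : List String) (last : List Int) : Nat → Int → List String
  | 0, _ => []
  | fuel + 1, m =>
      if 0 ≤ m then
        PySem.List.pyGetD words m "" :: pvWalk words last fuel (PySem.List.pyGetD last m 0)
      else []

def getWordsInLongestSubsequence (words : List String) (groups : List Int) : List String :=
  let n : Int := words.length
  -- dp = [0]*n; dp[0] = 1; last = [-1]*n; for i in range(1, n): …
  let st := (PySem.List.pyRange 1 n 1).foldl (pvStepA words groups) ([1], [-1])
  let dp := st.1
  let last := st.2
  -- m = 0; for i in range(1, n): if dp[i] > dp[m]: m = i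
  let m := (PySem.List.pyRange 1 n 1).foldl
    (fun (m : Int) i => if PySem.List.pyGetD dp i 0 > PySem.List.pyGetD dp m 0 then i else m) 0
  (pvWalk words last (words.length + 1) m).reverse

-- ===== PORT B =====
-- body of 'for p in range(len(w))' in Source B: look the bucket of pattern
-- (p, w[:p], w[p+1:]) up, scan it for a better predecessor, then add i to the bucket
def pvStepBP (words : List String) (groups : List Int) (dp : List Int) (i : Int)
    (st : PySem.Dict (Int × List Char × List Char) (List Int) × Int × Int) (p : Int) :
    PySem.Dict (Int × List Char × List Char) (List Int) × Int × Int :=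
  let w := (PySem.List.pyGetD words i "").toList
  let pat : Int × List Char × List Char :=
    (p, PySem.List.slice w none (some p), PySem.List.slice w (some (p + 1)) none)
  let q := (st.1.getD pat []).foldl
    (fun (q : Int × Int) j =>
      if PySem.List.pyGetD words j "" ≠ PySem.List.pyGetD words i ""
          ∧ PySem.List.pyGetD groups j 0 ≠ PySem.List.pyGetD groups i 0
          ∧ (PySem.List.pyGetD dp j 0 > q.1 ∨ (PySem.List.pyGetD dp j 0 = q.1 ∧ j < q.2))
      then (PySem.List.pyGetD dp j 0, j) else q) (st.2.1, st.2.2)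
  (st.1.insert pat (st.1.getD pat [] ++ [i]), q)

-- body of 'for i in range(n)' in Source B: run the pattern loop, then append to dp/last
def pvStepB (words : List String) (groups : List Int)
    (st : PySem.Dict (Int × List Char × List Char) (List Int) × List Int × List Int) (i : Int) :
    PySem.Dict (Int × List Char × List Char) (List Int) × List Int × List Int :=
  let r := (PySem.List.pyRange 0 (PySem.Str.len (PySem.List.pyGetD words i "")) 1).foldl
    (pvStepBP words groups st.2.1 i) (st.1, 0, -1)
  (r.1, st.2.1 ++ [r.2.1 + 1], st.2.2 ++ [r.2.2])

-- while m >= 0: ans.append(words[m]); m = last[m]   (fuel only makes the loop total)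
def pvWalkB (words : List String) (last : List Int) : Nat → Int → List String
  | 0, _ => []
  | fuel + 1, m =>
      if 0 ≤ m then
        PySem.List.pyGetD words m "" :: pvWalkB words last fuel (PySem.List.pyGetD last m 0)
      else []

def getWordsInLongestSubsequence_alt (words : List String) (groups : List Int) : List String :=
  let n : Int := words.length
  let st := (PySem.List.pyRange 0 n 1).foldl (pvStepB words groups) (PySem.Dict.empty, [], [])
  let dp := st.2.1
  let last := st.2.2
  -- m = max(range(n), key=lambda i: dp[i]); Python max raises on n = 0 (outside Pre_)
  let m := PySem.List.maxD (PySem.List.pyRange 0 n 1) (fun i => PySem.List.pyGetD dp i 0) 0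
  -- ans[::-1]
  (pvWalkB words last (words.length + 1) m).reverse

-- ===== PRECONDITION & SPEC =====
-- Pre_ excludes exactly the inputs where Python A raises IndexError: empty words
-- (dp[0] = 1) and groups shorter than words (groups[i]).
def Pre_getWordsInLongestSubsequence (words : List String) (groups : List Int) : Prop :=
  words ≠ [] ∧ words.length ≤ groups.length
instance (words : List String) (groups : List Int) :
    Decidable (Pre_getWordsInLongestSubsequence words groups) := by
  unfold Pre_getWordsInLongestSubsequence; infer_instance

def pvWitness_getWordsInLongestSubsequence : List String × List Int :=
  (["bab", "dab", "cab"], [1, 2, 2])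

def Spec_getWordsInLongestSubsequence (words : List String) (groups : List Int) (out : List String) : Prop := out = getWordsInLongestSubsequence_alt words groups
instance (words : List String) (groups : List Int) (out : List String) : Decidable (Spec_getWordsInLongestSubsequence words groups out) := by unfold Spec_getWordsInLongestSubsequence; infer_instance

-- ===== CLAIM (what is proved, stated in full; the proofs are below) =====
def Claim_equal_getWordsInLongestSubsequence : Prop := ∀ (words : List String) (groups : List Int), Dom_getWordsInLongestSubsequence words groups → Pre_getWordsInLongestSubsequence words groups → Spec_getWordsInLongestSubsequence words groups (getWordsInLongestSubsequence words groups)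

-- ===== LEMMAS AND PROOFS =====

-- ---------- the "better candidate" order shared by both argmax folds ----------

-- pvLe q r: candidate pair q = (dp value, index) is no better than r
def pvLe (q r : Int × Int) : Prop := q.1 < r.1 ∨ (q.1 = r.1 ∧ r.2 ≤ q.2)

-- the value both folds store for a candidate index j
def pvKey (dp : List Int) (j : Int) : Int × Int := (PySem.List.pyGetD dp j 0, j)

-- r is the best of {(0,-1)} ∪ {pvKey dp j | C j}
def pvBest (dp : List Int) (C : Int → Prop) (r : Int × Int) : Prop :=
  (r = (0, -1) ∨ ∃ j, C j ∧ r = pvKey dp j) ∧ pvLe (0, -1) r ∧ ∀ j, C j → pvLe (pvKey dp j) r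

-- A's validity test for a predecessor j of i
def pvCandA (words : List String) (groups : List Int) (i j : Int) : Prop :=
  PySem.List.pyGetD groups i 0 ≠ PySem.List.pyGetD groups j 0
  ∧ PySem.Str.len (PySem.List.pyGetD words i "") = PySem.Str.len (PySem.List.pyGetD words j "")
  ∧ pvHamming (PySem.List.pyGetD words i "") (PySem.List.pyGetD words j "") = 1

-- B's validity test for a bucket entry j
def pvCandB (words : List String) (groups : List Int) (i j : Int) : Prop :=
  PySem.List.pyGetD words j "" ≠ PySem.List.pyGetD words i ""
  ∧ PySem.List.pyGetD groups j 0 ≠ PySem.List.pyGetD groups i 0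

lemma pvLe_trans {a b c : Int × Int} (h1 : pvLe a b) (h2 : pvLe b c) : pvLe a c := by
  unfold pvLe at *; omega

lemma pvLe_antisymm {a b : Int × Int} (h1 : pvLe a b) (h2 : pvLe b a) : a = b := by
  unfold pvLe at *
  have h : a.1 = b.1 ∧ a.2 = b.2 := by omega
  exact Prod.ext h.1 h.2

lemma pvBest_unique {dp : List Int} {C C' : Int → Prop} {r r' : Int × Int}
    (hCC : ∀ j, C j ↔ C' j) (h : pvBest dp C r) (h' : pvBest dp C' r') : r = r' := by
  obtain ⟨hm, hz, hu⟩ := h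
  obtain ⟨hm', hz', hu'⟩ := h'
  apply pvLe_antisymm
  · rcases hm with rfl | ⟨j, hj, rfl⟩
    · exact hz'
    · exact hu' j ((hCC j).mp hj)
  · rcases hm' with rfl | ⟨j, hj, rfl⟩
    · exact hz
    · exact hu j ((hCC j).mpr hj)

lemma pvBest_congr {dp : List Int} {C C' : Int → Prop} {r : Int × Int}
    (hCC : ∀ j, C j ↔ C' j) (h : pvBest dp C r) : pvBest dp C' r := by
  obtain ⟨hm, hz, hu⟩ := h
  refine ⟨?_, hz, fun j hj => hu j ((hCC j).mpr hj)⟩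
  rcases hm with h | ⟨j, hj, he⟩
  · exact Or.inl h
  · exact Or.inr ⟨j, (hCC j).mp hj, he⟩

-- ---------- A's inner scan computes pvBest ----------

-- A's inner fold over j in range(i), re-indexed over Nat
def pvFA (words : List String) (groups : List Int) (dp : List Int) (i : Int) (m : Nat) : Int × Int :=
  (List.range m).foldl
    (fun (p : Int × Int) (j : Nat) =>
      if PySem.List.pyGetD groups i 0 ≠ PySem.List.pyGetD groups (j : Int) 0
          ∧ PySem.Str.len (PySem.List.pyGetD words i "") = PySem.Str.len (PySem.List.pyGetD words (j : Int) "")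
          ∧ pvHamming (PySem.List.pyGetD words i "") (PySem.List.pyGetD words (j : Int) "") = 1
          ∧ PySem.List.pyGetD dp (j : Int) 0 > p.1
      then (PySem.List.pyGetD dp (j : Int) 0, (j : Int)) else p) (0, -1)

lemma pvFA_pyRange (words : List String) (groups : List Int) (dp : List Int) (i : Int) (m : Nat)
    (hm : i = (m : Int)) :
    ((PySem.List.pyRange 0 i 1).foldl
      (fun (p : Int × Int) j =>
        if PySem.List.pyGetD groups i 0 ≠ PySem.List.pyGetD groups j 0
            ∧ PySem.Str.len (PySem.List.pyGetD words i "") = PySem.Str.len (PySem.List.pyGetD words j "")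
            ∧ pvHamming (PySem.List.pyGetD words i "") (PySem.List.pyGetD words j "") = 1
            ∧ PySem.List.pyGetD dp j 0 > p.1
        then (PySem.List.pyGetD dp j 0, j) else p) (0, -1))
    = pvFA words groups dp i m := by
  subst hm
  rw [PySem.List.pyRange_zero_nat, List.foldl_map]; rfl

lemma pvFA_spec (words : List String) (groups : List Int) (dp : List Int) (i : Int) (m : Nat) :
    pvBest dp (fun j => ∃ jn : Nat, jn < m ∧ j = (jn : Int) ∧ pvCandA words groups i j)
      (pvFA words groups dp i m)
    ∧ -1 ≤ (pvFA words groups dp i m).2 ∧ (pvFA words groups dp i m).2 < (m : Int) := by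
  induction m with
  | zero =>
    refine ⟨⟨Or.inl rfl, Or.inr ⟨rfl, le_refl _⟩, ?_⟩, by simp [pvFA], by simp [pvFA]⟩
    rintro j ⟨jn, hjn, _⟩; omega
  | succ m ih =>
    obtain ⟨⟨hmem, hz, hub⟩, hb1, hb2⟩ := ih
    have hstep : pvFA words groups dp i (m + 1)
        = (if PySem.List.pyGetD groups i 0 ≠ PySem.List.pyGetD groups (m : Int) 0
              ∧ PySem.Str.len (PySem.List.pyGetD words i "") = PySem.Str.len (PySem.List.pyGetD words (m : Int) "")
              ∧ pvHamming (PySem.List.pyGetD words i "") (PySem.List.pyGetD words (m : Int) "") = 1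
              ∧ PySem.List.pyGetD dp (m : Int) 0 > (pvFA words groups dp i m).1
           then (PySem.List.pyGetD dp (m : Int) 0, (m : Int)) else pvFA words groups dp i m) := by
      unfold pvFA
      rw [List.range_succ, List.foldl_append, List.foldl_cons, List.foldl_nil]
    rw [hstep]
    by_cases hc : PySem.List.pyGetD groups i 0 ≠ PySem.List.pyGetD groups (m : Int) 0
        ∧ PySem.Str.len (PySem.List.pyGetD words i "") = PySem.Str.len (PySem.List.pyGetD words (m : Int) "")
        ∧ pvHamming (PySem.List.pyGetD words i "") (PySem.List.pyGetD words (m : Int) "") = 1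
        ∧ PySem.List.pyGetD dp (m : Int) 0 > (pvFA words groups dp i m).1
    · rw [if_pos hc]
      refine ⟨⟨Or.inr ⟨(m : Int), ⟨m, by omega, rfl, ⟨hc.1, hc.2.1, hc.2.2.1⟩⟩, rfl⟩, ?_, ?_⟩,
        by simp, by push_cast; omega⟩
      · exact pvLe_trans hz (by unfold pvLe pvKey at *; have := hc.2.2.2; dsimp at *; omega)
      · rintro j ⟨jn, hjn, rfl, hcand⟩
        rcases Nat.lt_succ_iff_lt_or_eq.mp hjn with h | h
        · refine pvLe_trans (hub _ ⟨jn, h, rfl, hcand⟩) ?_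
          unfold pvLe pvKey at *; have := hc.2.2.2; dsimp at *; omega
        · subst h; unfold pvLe pvKey; dsimp; omega
    · rw [if_neg hc]
      refine ⟨⟨?_, hz, ?_⟩, hb1, by push_cast at *; omega⟩
      · rcases hmem with h | ⟨j, hj, hjoin⟩
        · exact Or.inl h
        · exact Or.inr ⟨j, ⟨hj.choose, by have := hj.choose_spec; omega,
            hj.choose_spec.2.1, hj.choose_spec.2.2⟩, hjoin⟩
      · rintro j ⟨jn, hjn, rfl, hcand⟩
        rcases Nat.lt_succ_iff_lt_or_eq.mp hjn with h | h
        · exact hub _ ⟨jn, h, rfl, hcand⟩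
        · subst h
          unfold pvCandA at hcand
          obtain ⟨hc1, hc2, hc3⟩ := hcand
          have h4 : ¬ PySem.List.pyGetD dp ((jn : Nat) : Int) 0 > (pvFA words groups dp i jn).1 := by
            tauto
          unfold pvLe pvKey
          dsimp
          omega

-- ---------- B's bucket scans compute pvBest ----------

-- B's per-bucket update, exactly the lambda of pvStepBP
def pvUpdB (words : List String) (groups : List Int) (dp : List Int) (i : Int)
    (q : Int × Int) (j : Int) : Int × Int :=
  if PySem.List.pyGetD words j "" ≠ PySem.List.pyGetD words i ""
      ∧ PySem.List.pyGetD groups j 0 ≠ PySem.List.pyGetD groups i 0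
      ∧ (PySem.List.pyGetD dp j 0 > q.1 ∨ (PySem.List.pyGetD dp j 0 = q.1 ∧ j < q.2))
  then (PySem.List.pyGetD dp j 0, j) else q

lemma pvUpdB_fold_spec (words : List String) (groups : List Int) (dp : List Int) (i : Int)
    (L : List Int) : ∀ (q0 : Int × Int),
    (L.foldl (pvUpdB words groups dp i) q0 = q0
      ∨ ∃ j ∈ L, pvCandB words groups i j ∧ L.foldl (pvUpdB words groups dp i) q0 = pvKey dp j)
    ∧ pvLe q0 (L.foldl (pvUpdB words groups dp i) q0)
    ∧ ∀ j ∈ L, pvCandB words groups i j → pvLe (pvKey dp j) (L.foldl (pvUpdB words groups dp i) q0) := by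
  induction L with
  | nil => intro q0; refine ⟨Or.inl rfl, Or.inr ⟨rfl, le_refl _⟩, by simp⟩
  | cons a t ih =>
    intro q0
    rw [List.foldl_cons]
    obtain ⟨ihm, ihz, ihu⟩ := ih (pvUpdB words groups dp i q0 a)
    have hstep : pvUpdB words groups dp i q0 a = q0
        ∨ (pvCandB words groups i a ∧ pvUpdB words groups dp i q0 a = pvKey dp a) := by
      unfold pvUpdB pvCandB pvKey
      by_cases h : PySem.List.pyGetD words a "" ≠ PySem.List.pyGetD words i ""
          ∧ PySem.List.pyGetD groups a 0 ≠ PySem.List.pyGetD groups i 0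
          ∧ (PySem.List.pyGetD dp a 0 > q0.1 ∨ (PySem.List.pyGetD dp a 0 = q0.1 ∧ a < q0.2))
      · exact Or.inr ⟨⟨h.1, h.2.1⟩, by rw [if_pos h]⟩
      · exact Or.inl (by rw [if_neg h])
    have hgrow : pvLe q0 (pvUpdB words groups dp i q0 a) := by
      unfold pvUpdB
      split_ifs with h
      · unfold pvLe; omega
      · unfold pvLe; omega
    refine ⟨?_, pvLe_trans hgrow ihz, ?_⟩
    · rcases ihm with h | ⟨j, hj, hc, he⟩
      · rw [h]
        rcases hstep with h2 | ⟨hc, h2⟩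
        · exact Or.inl h2
        · exact Or.inr ⟨a, List.mem_cons_self .., hc, h2⟩
      · exact Or.inr ⟨j, List.mem_cons_of_mem _ hj, hc, he⟩
    · intro j hj hc
      rcases List.mem_cons.mp hj with rfl | hj'
      · -- j = a: either it was taken (then ≤ via growth) or it lost to q0
        have hle : pvLe (pvKey dp j) (pvUpdB words groups dp i q0 j) := by
          unfold pvUpdB pvKey
          split_ifs with h
          · unfold pvLe; omega
          · unfold pvCandB at hc
            have h4 : ¬ (PySem.List.pyGetD dp j 0 > q0.1
                ∨ (PySem.List.pyGetD dp j 0 = q0.1 ∧ j < q0.2)) := by tauto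
            unfold pvLe
            omega
        exact pvLe_trans hle ihz
      · exact ihu j hj' hc

lemma pvBest_merge {words : List String} {groups : List Int} {dp : List Int} {i : Int}
    {C : Int → Prop} {q : Int × Int} (L : List Int)
    (hq : pvBest dp C q) :
    pvBest dp (fun j => C j ∨ (j ∈ L ∧ pvCandB words groups i j))
      (L.foldl (pvUpdB words groups dp i) q) := by
  obtain ⟨hm, hz, hu⟩ := hq
  obtain ⟨fm, fz, fu⟩ := pvUpdB_fold_spec words groups dp i L q
  refine ⟨?_, pvLe_trans hz fz, ?_⟩
  · rcases fm with h | ⟨j, hj, hc, he⟩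
    · rw [h]
      rcases hm with h2 | ⟨j, hj2, he2⟩
      · exact Or.inl h2
      · exact Or.inr ⟨j, Or.inl hj2, he2⟩
    · exact Or.inr ⟨j, Or.inr ⟨hj, hc⟩, he⟩
  · rintro j (hC | ⟨hmem, hc⟩)
    · exact pvLe_trans (hu j hC) fz
    · exact fu j hmem hc

-- ---------- wildcard patterns and the bucket invariant ----------

def pvWl (words : List String) (j : Nat) : List Char := (words.getD j "").toList

def pvPatKey (w : List Char) (p : Nat) : Int × List Char × List Char :=
  ((p : Int), w.take p, w.drop (p + 1))

def pvPatPred (w : List Char) (κ : Int × List Char × List Char) : Bool :=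
  decide (0 ≤ κ.1) && decide (κ.1.toNat < w.length)
  && decide (w.take κ.1.toNat = κ.2.1) && decide (w.drop (κ.1.toNat + 1) = κ.2.2)

-- the canonical content of a bucket after words 0..i-1 have been inserted
def pvBuck (words : List String) (i : Nat) (κ : Int × List Char × List Char) : List Int :=
  ((List.range i).filter (fun j => pvPatPred (pvWl words j) κ)).map (fun j => ((j : Nat) : Int))

def pvBInv (words : List String) (bk : PySem.Dict (Int × List Char × List Char) (List Int))
    (i : Nat) : Prop := ∀ κ, bk.getD κ [] = pvBuck words i κ

lemma pvPatKey_ne (w w' : List Char) {p p' : Nat} (hne : p ≠ p') :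
    pvPatKey w p ≠ pvPatKey w' p' := by
  simp only [pvPatKey, ne_eq, Prod.mk.injEq, not_and]
  intro h
  exact absurd (by exact_mod_cast h) hne

lemma pvPatPred_patKey (u v : List Char) (p : Nat) :
    pvPatPred u (pvPatKey v p) = true
    ↔ (p < u.length ∧ u.take p = v.take p ∧ u.drop (p + 1) = v.drop (p + 1)) := by
  unfold pvPatPred pvPatKey
  simp
  tauto

lemma pvPatPred_iff_exists (w : List Char) (κ : Int × List Char × List Char) :
    pvPatPred w κ = true ↔ ∃ p : Nat, p < w.length ∧ κ = pvPatKey w p := by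
  constructor
  · intro h
    unfold pvPatPred at h
    simp only [Bool.and_eq_true, decide_eq_true_eq] at h
    obtain ⟨⟨⟨h0, h1⟩, h2⟩, h3⟩ := h
    refine ⟨κ.1.toNat, h1, ?_⟩
    obtain ⟨k1, k2, k3⟩ := κ
    simp only [pvPatKey] at *
    have hc : ((k1.toNat : Nat) : Int) = k1 := by omega
    simp_all
  · rintro ⟨p, hp, rfl⟩
    exact (pvPatPred_patKey w w p).mpr ⟨hp, rfl, rfl⟩

-- ---------- B's inner p-loop: bucket lookups + updates ----------

lemma pvInnerB (words : List String) (groups : List Int) (dp : List Int) (i : Nat)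
    (bk : PySem.Dict (Int × List Char × List Char) (List Int)) (hbk : pvBInv words bk i)
    (k : Nat) :
    (∀ κ, ((List.range k).foldl
        (fun st (p : Nat) => pvStepBP words groups dp (i : Int) st ((p : Nat) : Int))
        (bk, 0, -1)).1.getD κ []
      = if ∃ p : Nat, p < k ∧ κ = pvPatKey (pvWl words i) p
        then pvBuck words i κ ++ [(i : Int)] else pvBuck words i κ)
    ∧ pvBest dp (fun j => ∃ p : Nat, p < k
          ∧ j ∈ pvBuck words i (pvPatKey (pvWl words i) p) ∧ pvCandB words groups (i : Int) j)
        ((List.range k).foldl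
          (fun st (p : Nat) => pvStepBP words groups dp (i : Int) st ((p : Nat) : Int))
          (bk, 0, -1)).2 := by
  induction k with
  | zero =>
    refine ⟨?_, ?_, ?_, ?_⟩
    · intro κ
      rw [if_neg (by rintro ⟨p, hp, _⟩; omega)]
      exact hbk κ
    · exact Or.inl rfl
    · exact Or.inr ⟨rfl, le_refl _⟩
    · rintro j ⟨p, hp, _⟩; omega
  | succ k ih =>
    obtain ⟨ihd, ihq⟩ := ih
    set st := (List.range k).foldl
        (fun st (p : Nat) => pvStepBP words groups dp (i : Int) st ((p : Nat) : Int))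
        (bk, 0, -1) with hst
    have hfold : (List.range (k + 1)).foldl
          (fun st (p : Nat) => pvStepBP words groups dp (i : Int) st ((p : Nat) : Int)) (bk, 0, -1)
        = pvStepBP words groups dp (i : Int) st ((k : Nat) : Int) := by
      rw [List.range_succ, List.foldl_append, List.foldl_cons, List.foldl_nil]
    have hw : (PySem.List.pyGetD words ((i : Nat) : Int) "").toList = pvWl words i := by
      rw [PySem.List.pyGetD_natCast]; rfl
    -- the pattern formed at step k is pvPatKey (pvWl words i) k
    have hpat : (((k : Nat) : Int), PySem.List.slice (pvWl words i) none (some ((k : Nat) : Int)),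
          PySem.List.slice (pvWl words i) (some (((k : Nat) : Int) + 1)) none)
        = pvPatKey (pvWl words i) k := by
      rw [PySem.List.slice_to _ (by positivity)]
      rw [show (((k : Nat) : Int) + 1) = (((k + 1 : Nat) : Nat) : Int) by push_cast; ring]
      rw [PySem.List.slice_from _ (by positivity)]
      simp [pvPatKey]
    have hstep : pvStepBP words groups dp (i : Int) st ((k : Nat) : Int)
        = (st.1.insert (pvPatKey (pvWl words i) k)
            (pvBuck words i (pvPatKey (pvWl words i) k) ++ [(i : Int)]),
           (pvBuck words i (pvPatKey (pvWl words i) k)).foldl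
            (pvUpdB words groups dp (i : Int)) st.2) := by
      show (st.1.insert _ (st.1.getD _ [] ++ [(i : Int)]),
        (st.1.getD _ []).foldl _ (st.2.1, st.2.2)) = _
      rw [show ((PySem.List.pyGetD words ((i : Nat) : Int) "").toList : List Char) = pvWl words i from hw]
      rw [hpat]
      have hget : st.1.getD (pvPatKey (pvWl words i) k) []
          = pvBuck words i (pvPatKey (pvWl words i) k) := by
        rw [ihd, if_neg]
        rintro ⟨p, hp, hpe⟩
        exact pvPatKey_ne (pvWl words i) (pvWl words i) (by omega) hpe.symm
      rw [hget]
      rfl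
    rw [hfold, hstep]
    constructor
    · intro κ
      rw [PySem.Dict.getD_insert]
      by_cases hκ : κ = pvPatKey (pvWl words i) k
      · rw [if_pos hκ, if_pos ⟨k, by omega, hκ⟩, hκ]
      · rw [if_neg hκ, ihd κ]
        by_cases he : ∃ p : Nat, p < k ∧ κ = pvPatKey (pvWl words i) p
        · rw [if_pos he, if_pos ⟨he.choose, by have := he.choose_spec; omega, he.choose_spec.2⟩]
        · rw [if_neg he, if_neg]
          rintro ⟨p, hp, hpe⟩
          rcases Nat.lt_succ_iff_lt_or_eq.mp hp with h | h
          · exact he ⟨p, h, hpe⟩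
          · exact hκ (h ▸ hpe)
    · refine pvBest_congr ?_ (pvBest_merge (words := words) (groups := groups) (i := (i : Int))
        (pvBuck words i (pvPatKey (pvWl words i) k)) ihq)
      intro j
      constructor
      · rintro (⟨p, hp, hjm, hc⟩ | ⟨hjm, hc⟩)
        · exact ⟨p, by omega, hjm, hc⟩
        · exact ⟨k, by omega, hjm, hc⟩
      · rintro ⟨p, hp, hjm, hc⟩
        rcases Nat.lt_succ_iff_lt_or_eq.mp hp with h | h
        · exact Or.inl ⟨p, h, hjm, hc⟩
        · subst h; exact Or.inr ⟨hjm, hc⟩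

-- ---------- one-character difference = shared wildcard pattern ----------

def pvHamN (u v : List Char) : Nat := (u.zip v).countP (fun q => decide (q.1 ≠ q.2))

lemma pvHam_aux (l : List (Char × Char)) : ∀ acc : Int,
    l.foldl (fun acc p => acc + (if p.1 ≠ p.2 then 1 else 0)) acc
    = acc + (l.countP (fun q => decide (q.1 ≠ q.2)) : Int) := by
  induction l with
  | nil => intro acc; simp
  | cons h t ih =>
    intro acc
    rw [List.foldl_cons, ih, List.countP_cons]
    by_cases hh : h.1 = h.2 <;> (simp [hh]; try ring)

lemma pvHamming_eq_hamN (s t : String) : pvHamming s t = (pvHamN s.toList t.toList : Int) := by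
  unfold pvHamming pvHamN
  rw [pvHam_aux]; ring

lemma pvHamN_comm (u v : List Char) : pvHamN u v = pvHamN v u := by
  unfold pvHamN
  rw [← List.zip_swap v u, List.countP_map]
  exact List.countP_congr (fun a _ => by simp [Function.comp, ne_comm])

lemma pvHamN_zero_iff (u : List Char) : ∀ v : List Char, u.length = v.length →
    (pvHamN u v = 0 ↔ u = v) := by
  induction u with
  | nil => intro v h; cases v <;> simp_all [pvHamN]
  | cons a u ih =>
    intro v h
    cases v with
    | nil => simp at h
    | cons b v =>
      simp only [List.length_cons, Nat.add_right_cancel_iff] at h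
      unfold pvHamN at *
      rw [List.zip_cons_cons, List.countP_cons]
      by_cases hab : a = b
      · subst hab
        rw [if_neg (by simp), add_zero, ih v h]
        simp
      · simp [hab]

lemma pvOneDiff (u : List Char) : ∀ v : List Char,
    (u ≠ v ∧ ∃ p : Nat, p < u.length ∧ p < v.length ∧ u.take p = v.take p
        ∧ u.drop (p + 1) = v.drop (p + 1))
    ↔ (u.length = v.length ∧ pvHamN u v = 1) := by
  induction u with
  | nil =>
    intro v
    constructor
    · rintro ⟨_, p, hp, _⟩; simp at hp
    · rintro ⟨h, hh⟩
      have hv : v = [] := by simpa using h.symm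
      subst hv; simp [pvHamN] at hh
  | cons a u ih =>
    intro v
    cases v with
    | nil =>
      constructor
      · rintro ⟨_, p, _, hp, _⟩; simp at hp
      · rintro ⟨h, _⟩; simp at h
    | cons b v =>
      have hham : pvHamN (a :: u) (b :: v) = (if a ≠ b then 1 else 0) + pvHamN u v := by
        unfold pvHamN; rw [List.zip_cons_cons, List.countP_cons]
        by_cases hab : a = b <;> (simp [hab]; try omega)
      by_cases hab : a = b
      · subst hab
        constructor
        · rintro ⟨hne, p, hp1, hp2, ht, hd⟩
          have hne' : u ≠ v := by intro he; exact hne (by rw [he])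
          cases p with
          | zero => exact absurd (by simpa using hd) hne'
          | succ p =>
            have hod := (ih v).mp ⟨hne', p, by simpa using hp1, by simpa using hp2,
              by simpa using ht, by simpa using hd⟩
            simp [hham, hod.1, hod.2]
        · rintro ⟨hl, hh⟩
          rw [hham] at hh; simp at hh
          have hl' : u.length = v.length := by simpa using hl
          have hod := (ih v).mpr ⟨hl', hh⟩
          obtain ⟨hne', p, h1, h2, h3, h4⟩ := hod
          exact ⟨by simp [hne'], p + 1, by simpa using h1, by simpa using h2,
            by simpa using h3, by simpa using h4⟩
      · constructor
        · rintro ⟨hne, p, hp1, hp2, ht, hd⟩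
          cases p with
          | zero =>
            have hv : u = v := by simpa using hd
            subst hv
            rw [hham]
            simp [hab, (pvHamN_zero_iff u u rfl).mpr rfl]
          | succ p =>
            exfalso
            have hhd : a = b := by
              have := congrArg (fun l => l.head?) ht
              simpa using this
            exact hab hhd
        · rintro ⟨hl, hh⟩
          rw [hham] at hh
          simp only [ne_eq, hab, not_false_eq_true, if_true] at hh
          have h0 : pvHamN u v = 0 := by omega
          have hl' : u.length = v.length := by simpa using hl
          have huv : u = v := (pvHamN_zero_iff u v hl').mp h0
          subst huv
          exact ⟨by simp [hab], 0, by simp, by simp, by simp, by simp⟩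

-- candidate-set equivalence: j comes out of one of i's buckets and passes B's test
-- iff j < i and passes A's test
lemma pvMem_pvBuck (words : List String) (i : Nat) (κ : Int × List Char × List Char) (j : Int) :
    j ∈ pvBuck words i κ
    ↔ ∃ jn : Nat, jn < i ∧ j = (jn : Int) ∧ pvPatPred (pvWl words jn) κ = true := by
  unfold pvBuck
  simp only [List.mem_map, List.mem_filter, List.mem_range]
  constructor
  · rintro ⟨jn, ⟨h1, h2⟩, rfl⟩; exact ⟨jn, h1, rfl, h2⟩
  · rintro ⟨jn, h1, rfl, h2⟩; exact ⟨jn, ⟨h1, h2⟩, rfl⟩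

lemma pvMemIff (words : List String) (groups : List Int) (i : Nat) (j : Int) :
    (∃ p : Nat, p < (pvWl words i).length
        ∧ j ∈ pvBuck words i (pvPatKey (pvWl words i) p) ∧ pvCandB words groups (i : Int) j)
    ↔ ∃ jn : Nat, jn < i ∧ j = (jn : Int) ∧ pvCandA words groups (i : Int) j := by
  have hw : ∀ k : Nat, PySem.List.pyGetD words ((k : Nat) : Int) "" = words.getD k "" := by
    intro k; rw [PySem.List.pyGetD_natCast]
  have hg : ∀ k : Nat, (words.getD k "").toList = pvWl words k := fun k => rfl
  constructor
  · rintro ⟨p, hp, hjm, hcb⟩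
    rw [pvMem_pvBuck] at hjm
    obtain ⟨jn, hjn, rfl, hpred⟩ := hjm
    rw [pvPatPred_patKey] at hpred
    obtain ⟨hp1, hp2, hp3⟩ := hpred
    obtain ⟨hs, hgr⟩ := hcb
    have hne : pvWl words jn ≠ pvWl words i := by
      intro he
      apply hs
      rw [hw jn, hw i] at *
      exact String.toList_inj.mp he
    have hod := (pvOneDiff (pvWl words jn) (pvWl words i)).mp ⟨hne, p, hp1, hp, hp2, hp3⟩
    refine ⟨jn, hjn, rfl, hgr.symm, ?_, ?_⟩
    · rw [hw jn, hw i, PySem.Str.len_eq, PySem.Str.len_eq, hg jn, hg i]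
      exact_mod_cast hod.1.symm
    · rw [hw jn, hw i, pvHamming_eq_hamN, hg jn, hg i, pvHamN_comm]
      exact_mod_cast hod.2
  · rintro ⟨jn, hjn, rfl, hgr, hlen, hham⟩
    rw [hw jn, hw i, PySem.Str.len_eq, PySem.Str.len_eq, hg jn, hg i] at hlen
    rw [hw jn, hw i, pvHamming_eq_hamN, hg jn, hg i, pvHamN_comm] at hham
    have hod := (pvOneDiff (pvWl words jn) (pvWl words i)).mpr
      ⟨by exact_mod_cast hlen.symm, by exact_mod_cast hham⟩
    obtain ⟨hne, p, hp1, hp2, hp3, hp4⟩ := hod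
    refine ⟨p, hp2, ?_, ?_, hgr.symm⟩
    · rw [pvMem_pvBuck]
      exact ⟨jn, hjn, rfl, (pvPatPred_patKey _ _ _).mpr ⟨hp1, hp3, hp4⟩⟩
    · intro he
      rw [hw jn, hw i] at he
      exact hne (by rw [← hg jn, ← hg i, he])

-- ---------- the joint dp/last recursion and both outer loops ----------

def pvD (words : List String) (groups : List Int) : Nat → List Int × List Int
  | 0 => ([], [])
  | k + 1 =>
      let st := pvD words groups k
      (st.1 ++ [(pvFA words groups st.1 (k : Int) k).1 + 1],
       st.2 ++ [(pvFA words groups st.1 (k : Int) k).2])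

-- A's outer fold, Nat-indexed
def pvSA (words : List String) (groups : List Int) (m : Nat) : List Int × List Int :=
  (List.range m).foldl (fun st (k : Nat) => pvStepA words groups st (1 + (k : Int))) ([1], [-1])

-- B's outer fold, Nat-indexed
def pvSB (words : List String) (groups : List Int) (m : Nat) :
    PySem.Dict (Int × List Char × List Char) (List Int) × List Int × List Int :=
  (List.range m).foldl (fun st (k : Nat) => pvStepB words groups st ((k : Nat) : Int))
    (PySem.Dict.empty, [], [])

lemma pvBuck_succ (words : List String) (m : Nat) (κ : Int × List Char × List Char) :
    pvBuck words (m + 1) κ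
    = pvBuck words m κ ++ (if pvPatPred (pvWl words m) κ then [((m : Nat) : Int)] else []) := by
  unfold pvBuck
  rw [List.range_succ, List.filter_append, List.map_append]
  by_cases h : pvPatPred (pvWl words m) κ
  · simp [h]
  · simp [h]

lemma pvSA_eq_pvD (words : List String) (groups : List Int) (m : Nat) :
    pvSA words groups m = pvD words groups (m + 1) := by
  induction m with
  | zero => simp [pvSA, pvD, pvFA]
  | succ m ih =>
    have h1 : pvSA words groups (m + 1)
        = pvStepA words groups (pvSA words groups m) (1 + (m : Int)) := by
      unfold pvSA
      rw [List.range_succ, List.foldl_append, List.foldl_cons, List.foldl_nil]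
    rw [h1, ih]
    unfold pvStepA
    dsimp only
    rw [show (1 + (m : Int)) = (((m + 1 : Nat) : Nat) : Int) by push_cast; ring]
    rw [pvFA_pyRange words groups (pvD words groups (m + 1)).1 (((m + 1 : Nat) : Nat) : Int)
      (m + 1) rfl]
    rfl

lemma pvSB_eq_pvD (words : List String) (groups : List Int) (m : Nat) :
    pvBInv words (pvSB words groups m).1 m ∧ (pvSB words groups m).2 = pvD words groups m := by
  induction m with
  | zero =>
    constructor
    · intro κ; simp [pvSB, pvBuck, PySem.Dict.getD_empty]
    · rfl
  | succ m ih =>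
    obtain ⟨ihb, ihd⟩ := ih
    have h1 : pvSB words groups (m + 1)
        = pvStepB words groups (pvSB words groups m) ((m : Nat) : Int) := by
      unfold pvSB
      rw [List.range_succ, List.foldl_append, List.foldl_cons, List.foldl_nil]
    have hlen : PySem.Str.len (PySem.List.pyGetD words ((m : Nat) : Int) "")
        = (((pvWl words m).length : Nat) : Int) := by
      rw [PySem.List.pyGetD_natCast, PySem.Str.len_eq]; rfl
    have hrange : PySem.List.pyRange 0 (PySem.Str.len (PySem.List.pyGetD words ((m : Nat) : Int) "")) 1
        = (List.range (pvWl words m).length).map (fun p => ((p : Nat) : Int)) := by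
      rw [hlen, PySem.List.pyRange_zero_nat]
    rw [h1]
    unfold pvStepB
    dsimp only
    rw [hrange, List.foldl_map]
    obtain ⟨hd, hq⟩ := pvInnerB words groups ((pvSB words groups m).2.1) m
      (pvSB words groups m).1 ihb ((pvWl words m).length)
    have hr2 : ((List.range (pvWl words m).length).foldl
          (fun st (p : Nat) => pvStepBP words groups (pvSB words groups m).2.1 ((m : Nat) : Int) st
            ((p : Nat) : Int)) ((pvSB words groups m).1, 0, -1)).2
        = pvFA words groups (pvSB words groups m).2.1 ((m : Nat) : Int) m :=
      pvBest_unique (pvMemIff words groups m) hq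
        (pvFA_spec words groups (pvSB words groups m).2.1 ((m : Nat) : Int) m).1
    constructor
    · intro κ
      rw [hd κ, pvBuck_succ]
      by_cases he : ∃ p : Nat, p < (pvWl words m).length ∧ κ = pvPatKey (pvWl words m) p
      · rw [if_pos he, if_pos ((pvPatPred_iff_exists (pvWl words m) κ).mpr he)]
      · rw [if_neg he, if_neg (fun hp => he ((pvPatPred_iff_exists (pvWl words m) κ).mp hp)),
          List.append_nil]
    · dsimp only
      rw [hr2, ihd]
      rfl

-- ---------- tail: argmax over dp, and the reconstruction walk ----------

lemma pvMax_aux (key : Int → Int) : ∀ (l : List Int) (x : Int),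
    PySem.List.max? (x :: l) key = some (l.foldl (fun m i => if key m < key i then i else m) x) := by
  intro l
  induction l with
  | nil => intro x; rfl
  | cons h t ih =>
    intro x
    have h1 : PySem.List.max? (x :: h :: t) key
        = PySem.List.max? ((if key x < key h then h else x) :: t) key := by
      unfold PySem.List.max?
      rw [List.foldl_cons, List.foldl_cons, List.foldl_cons]
      by_cases hc : key x < key h
      · simp [hc]
      · simp [hc]
    rw [h1, ih, List.foldl_cons]

lemma pvMaxD_eq_scan (dp : List Int) (n : Nat) (hn : 1 ≤ n) :
    PySem.List.maxD (PySem.List.pyRange 0 (n : Int) 1) (fun i => PySem.List.pyGetD dp i 0) 0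
    = (PySem.List.pyRange 1 (n : Int) 1).foldl
        (fun (m : Int) i => if PySem.List.pyGetD dp i 0 > PySem.List.pyGetD dp m 0 then i else m) 0 := by
  unfold PySem.List.maxD
  rw [PySem.List.pyRange_one_cons (by exact_mod_cast hn), pvMax_aux, Option.getD_some]
  simp only [gt_iff_lt]
  norm_num

lemma pvWalk_eq_pvWalkB (words : List String) (last : List Int) :
    ∀ (fuel : Nat) (m : Int), pvWalk words last fuel m = pvWalkB words last fuel m := by
  intro fuel
  induction fuel with
  | zero => intro m; rfl
  | succ f ih => intro m; rw [pvWalk, pvWalkB, ih]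

-- ===== VERDICT (by name: the statement is the Claim_ definition above) =====
theorem getWordsInLongestSubsequence_spec : Claim_equal_getWordsInLongestSubsequence := by
  intro words groups _ hpre
  obtain ⟨hne, _⟩ := hpre
  have hn : 1 ≤ words.length := List.length_pos_of_ne_nil hne
  unfold Spec_getWordsInLongestSubsequence
  unfold getWordsInLongestSubsequence getWordsInLongestSubsequence_alt
  dsimp only
  have ht : ((words.length : Int) - 1).toNat = words.length - 1 := by omega
  have hA1 : (PySem.List.pyRange 1 (words.length : Int) 1).foldl (pvStepA words groups) ([1], [-1])
      = pvSA words groups (words.length - 1) := by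
    simp [PySem.List.pyRange_one, ht, pvSA, List.foldl_map]
  have hB1 : (PySem.List.pyRange 0 (words.length : Int) 1).foldl (pvStepB words groups)
        (PySem.Dict.empty, [], [])
      = pvSB words groups words.length := by
    rw [PySem.List.pyRange_zero_nat, List.foldl_map]
    rfl
  rw [hA1, hB1]
  have hsa := pvSA_eq_pvD words groups (words.length - 1)
  rw [show words.length - 1 + 1 = words.length from by omega] at hsa
  obtain ⟨_, hsb⟩ := pvSB_eq_pvD words groups words.length
  rw [hsa, hsb]
  rw [pvMaxD_eq_scan (pvD words groups words.length).1 words.length hn]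
  rw [pvWalk_eq_pvWalkB]
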